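-- pv_equiv track=rewrite | github.com/nmktad/A2SV | 2410-maximum-matching-of-players-with-trainers/2410-maximum-matching-of-players-with-trainers.py | matchPlayersAndTrainers
-- ===== SOURCE A (Python) =====
-- from typing import List
--
-- def matchPlayersAndTrainers(players: List[int], trainers: List[int]) -> int:
--     players.sort()
--     trainers.sort()
--     ans = 0
--     i , j = len(players)-1, len(trainers)-1
--     while i>=0 and j>=0:
--         if players[i]<=trainers[j]:
--             ans+=1
--             i-=1
--             j-=1
--         else:
--             i-=1
--     return ans
-- ===== SOURCE B (Python) =====
-- def matchPlayersAndTrainers(players, trainers):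
--     players.sort()
--     trainers.sort()
--     m = len(trainers)
--
--     def feasible(k):
--         # the k weakest players can all be matched to the k strongest trainers
--         return all(players[i] <= trainers[m - k + i] for i in range(k))
--
--     lo, hi = 0, min(len(players), m)
--     while lo < hi:
--         mid = (lo + hi + 1) // 2
--         if feasible(mid):
--             lo = mid
--         else:
--             hi = mid - 1
--     return lo
-- ===== Notes on version B (the rewrite author's own statement) =====
-- stated objective: alternative
-- what changed: Replaces A's greedy descending two-pointer scan with a binary search on the answer k, using the feasibility predicate 'the k weakest players all fit the k strongest trainers' checked by an all(...) pass; no pointer walk over both lists remains.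
import Mathlib
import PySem

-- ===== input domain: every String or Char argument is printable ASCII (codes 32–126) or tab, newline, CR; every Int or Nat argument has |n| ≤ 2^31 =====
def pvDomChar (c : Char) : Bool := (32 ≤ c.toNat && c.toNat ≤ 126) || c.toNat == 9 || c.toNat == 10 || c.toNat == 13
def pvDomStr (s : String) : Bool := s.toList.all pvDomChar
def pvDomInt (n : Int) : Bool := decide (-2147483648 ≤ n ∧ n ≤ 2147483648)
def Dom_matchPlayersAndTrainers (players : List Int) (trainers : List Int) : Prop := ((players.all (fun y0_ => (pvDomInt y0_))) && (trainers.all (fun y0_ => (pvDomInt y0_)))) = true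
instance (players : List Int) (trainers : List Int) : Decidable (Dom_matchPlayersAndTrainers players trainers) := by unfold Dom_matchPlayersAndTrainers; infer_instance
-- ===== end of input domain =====

-- B replaces A's greedy descending two-pointer scan with a binary search on the answer k,
-- checking 'the k weakest players all fit the k strongest trainers' (objective: alternative).
-- Both A and B sort the argument lists in place; the equivalence proved is about the return value.

-- ===== PORT A =====
-- A's while loop over the descending indices i (players) and j (trainers); indices are
-- always in range when read, so (pyGet? …).getD 0 equals Python's players[i]/trainers[j].
def aLoop (p t : List Int) (ans i j : Int) : Int :=
  if 0 ≤ i ∧ 0 ≤ j then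
    if (PySem.List.pyGet? p i).getD 0 ≤ (PySem.List.pyGet? t j).getD 0 then
      aLoop p t (ans + 1) (i - 1) (j - 1)
    else
      aLoop p t ans (i - 1) j
  else ans
termination_by (i + 1).toNat
decreasing_by all_goals omega

def matchPlayersAndTrainers (players : List Int) (trainers : List Int) : Int :=
  let p := PySem.List.sorted players (fun x => x) false
  let t := PySem.List.sorted trainers (fun x => x) false
  aLoop p t 0 ((p.length : Int) - 1) ((t.length : Int) - 1)

-- ===== PORT B =====
-- B's helper feasible(k): all(players[i] <= trainers[m-k+i] for i in range(k)); the reads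
-- are always in range when called (0 ≤ k ≤ min of the lengths), so pyGetD … 0 = Python's indexing.
def okB (p t : List Int) (k : Int) : Bool :=
  (PySem.List.pyRange 0 k 1).all (fun i =>
    decide (PySem.List.pyGetD p i 0 ≤ PySem.List.pyGetD t ((t.length : Int) - k + i) 0))

-- B's while loop: binary search on the answer over [lo, hi].
def bsB (p t : List Int) (lo hi : Int) : Int :=
  if lo < hi then
    let mid := PySem.Int.floordiv (lo + hi + 1) 2
    if okB p t mid then bsB p t mid hi else bsB p t lo (mid - 1)
  else lo
termination_by (hi - lo).toNat
decreasing_by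
  all_goals
    rename_i h _
    have h1 : lo + 1 ≤ PySem.Int.floordiv (lo + hi + 1) 2 :=
      (PySem.Int.le_floordiv_iff_mul_le (by omega)).mpr (by omega)
    have h2 : PySem.Int.floordiv (lo + hi + 1) 2 < hi + 1 :=
      (PySem.Int.floordiv_lt_iff_lt_mul (by omega)).mpr (by omega)
    omega

def matchPlayersAndTrainers_alt (players : List Int) (trainers : List Int) : Int :=
  let p := PySem.List.sorted players (fun x => x) false
  let t := PySem.List.sorted trainers (fun x => x) false
  bsB p t 0 (min (p.length : Int) (t.length : Int))

-- ===== PRECONDITION & SPEC =====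
def Spec_matchPlayersAndTrainers (players : List Int) (trainers : List Int) (out : Int) : Prop := out = matchPlayersAndTrainers_alt players trainers
instance (players : List Int) (trainers : List Int) (out : Int) : Decidable (Spec_matchPlayersAndTrainers players trainers out) := by unfold Spec_matchPlayersAndTrainers; infer_instance

-- ===== CLAIM (what is proved, stated in full; the proofs are below) =====
def Claim_equal_matchPlayersAndTrainers : Prop := ∀ (players : List Int) (trainers : List Int), Dom_matchPlayersAndTrainers players trainers → Spec_matchPlayersAndTrainers players trainers (matchPlayersAndTrainers players trainers)

-- ===== LEMMAS AND PROOFS =====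

-- A's greedy, abstracted: descending player/trainer lists, skip the player on failure.
def Fd : List Int → List Int → Int
  | x :: ps, y :: ts => if x ≤ y then 1 + Fd ps ts else Fd ps (y :: ts)
  | _, _ => 0

-- The same greedy on ascending lists, skipping the trainer on failure (bridge between A and B).
def Ga : List Int → List Int → Int
  | x :: ps, y :: ts => if x ≤ y then 1 + Ga ps ts else Ga (x :: ps) ts
  | _, _ => 0

-- 'the k weakest players fit the k strongest trainers', on the ascending sorted lists (Nat form).
def FeasN (p t : List Int) (k : Nat) : Prop :=
  ∀ i : Nat, i < k → p.getD i 0 ≤ t.getD (t.length - k + i) 0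

lemma Ga_nil_left (ts : List Int) : Ga [] ts = 0 := by cases ts <;> simp [Ga]

lemma Ga_nil_right (ps : List Int) : Ga ps [] = 0 := by cases ps <;> simp [Ga]

lemma Fd_nil_left (ts : List Int) : Fd [] ts = 0 := by cases ts <;> simp [Fd]

lemma Fd_nil_right (ps : List Int) : Fd ps [] = 0 := by cases ps <;> simp [Fd]

lemma rev_take_succ {α : Type} (p : List α) (k : Nat) (h : k < p.length) :
    (p.take (k + 1)).reverse = p[k] :: (p.take k).reverse := by
  rw [List.take_add_one]
  simp [List.getElem?_eq_getElem h]

lemma Ga_drop_big (ts : List Int) : ∀ (ps : List Int) (x : Int), (∀ y ∈ ts, y < x) →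
    Ga (ps ++ [x]) ts = Ga ps ts := by
  induction ts with
  | nil => intro ps x _; simp [Ga_nil_right]
  | cons y ts' ih =>
    intro ps x hbig
    have hyx : ¬ x ≤ y := by
      have := hbig y (by simp); omega
    cases ps with
    | nil =>
      have h1 := ih [] x (fun z hz => hbig z (by simp [hz]))
      simp only [List.nil_append] at h1
      simp [Ga, hyx, h1]
    | cons a ps' =>
      simp only [List.cons_append, Ga]
      by_cases hay : a ≤ y
      · simp only [hay, if_true]
        rw [ih ps' x (fun z hz => hbig z (by simp [hz]))]
      · simp only [hay, if_false]
        rw [show a :: (ps' ++ [x]) = (a :: ps') ++ [x] from rfl,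
          ih (a :: ps') x (fun z hz => hbig z (by simp [hz]))]

lemma Ga_single_match (ts : List Int) : ∀ (x tm : Int), x ≤ tm →
    Ga [x] (ts ++ [tm]) = 1 := by
  induction ts with
  | nil => intro x tm h; simp [Ga, h]
  | cons y ts' ih =>
    intro x tm h
    simp only [List.cons_append, Ga]
    by_cases hxy : x ≤ y
    · simp [hxy]
    · simp only [hxy, if_false]
      exact ih x tm h

lemma Ga_match_last (ts : List Int) : ∀ (ps : List Int) (pm tm : Int),
    (ps ++ [pm]).Pairwise (· ≤ ·) → (ts ++ [tm]).Pairwise (· ≤ ·) → pm ≤ tm →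
    Ga (ps ++ [pm]) (ts ++ [tm]) = 1 + Ga ps ts := by
  induction ts with
  | nil =>
    intro ps pm tm hp _ hle
    cases ps with
    | nil => simp [Ga, hle]
    | cons a ps' =>
      have ha : a ≤ pm := by
        have := (List.pairwise_cons.mp hp).1 pm (by simp)
        exact this
      simp only [List.cons_append, List.nil_append, Ga, Ga_nil_right]
      have hatm : a ≤ tm := le_trans ha hle
      simp [hatm]
  | cons y ts' ih =>
    intro ps pm tm hp ht hle
    cases ps with
    | nil =>
      simp only [List.nil_append]
      rw [Ga_single_match (y :: ts') pm tm hle, Ga_nil_left]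
      omega
    | cons a ps' =>
      have hp' : (ps' ++ [pm]).Pairwise (· ≤ ·) := (List.pairwise_cons.mp hp).2
      have ht' : (ts' ++ [tm]).Pairwise (· ≤ ·) := (List.pairwise_cons.mp ht).2
      simp only [List.cons_append, Ga]
      by_cases hay : a ≤ y
      · simp only [hay, if_true]
        rw [ih ps' pm tm hp' ht' hle]
      · simp only [hay, if_false]
        rw [show a :: (ps' ++ [pm]) = (a :: ps') ++ [pm] from rfl,
          ih (a :: ps') pm tm hp ht' hle]

lemma Fd_rev_eq_Ga (p : List Int) : ∀ (t : List Int),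
    p.Pairwise (· ≤ ·) → t.Pairwise (· ≤ ·) →
    Fd p.reverse t.reverse = Ga p t := by
  induction p using List.reverseRecOn with
  | nil => intro t _ _; rw [List.reverse_nil, Fd_nil_left, Ga_nil_left]
  | append_singleton ps pm ih =>
    intro t hp ht
    induction t using List.reverseRecOn with
    | nil => rw [List.reverse_nil, Fd_nil_right, Ga_nil_right]
    | append_singleton ts tm _ =>
      have hp' : ps.Pairwise (· ≤ ·) := (List.pairwise_append.mp hp).1
      have ht' : ts.Pairwise (· ≤ ·) := (List.pairwise_append.mp ht).1
      rw [List.reverse_append, List.reverse_append]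
      simp only [List.reverse_singleton, List.singleton_append, Fd]
      by_cases hle : pm ≤ tm
      · simp only [hle, if_true]
        rw [ih ts hp' ht', Ga_match_last ts ps pm tm hp ht hle]
      · simp only [hle, if_false]
        rw [show tm :: ts.reverse = (ts ++ [tm]).reverse by simp,
          ih (ts ++ [tm]) hp' ht]
        have hbig : ∀ y ∈ ts ++ [tm], y < pm := by
          intro y hy
          rcases List.mem_append.mp hy with h | h
          · have : y ≤ tm := (List.pairwise_append.mp ht).2.2 y h tm (by simp)
            omega
          · simp at h; omega
        rw [Ga_drop_big (ts ++ [tm]) ps pm hbig]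

lemma aLoop_eq_Fd (p t : List Int) : ∀ (i j ans : Int),
    i < (p.length : Int) → j < (t.length : Int) →
    aLoop p t ans i j = ans + Fd ((p.take (i + 1).toNat).reverse) ((t.take (j + 1).toNat).reverse) := by
  intro i j
  induction hn : (i + 1).toNat using Nat.strong_induction_on generalizing i j with
  | _ n ihn =>
  intro ans hi hj
  rw [aLoop]
  by_cases hij : 0 ≤ i ∧ 0 ≤ j
  · obtain ⟨hi0, hj0⟩ := hij
    have hiN : i.toNat < p.length := by omega
    have hjN : j.toNat < t.length := by omega
    have hgi : (PySem.List.pyGet? p i).getD 0 = p[i.toNat] := by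
      rw [PySem.List.pyGet?_of_nonneg p hi0, List.getElem?_eq_getElem hiN]; rfl
    have hgj : (PySem.List.pyGet? t j).getD 0 = t[j.toNat] := by
      rw [PySem.List.pyGet?_of_nonneg t hj0, List.getElem?_eq_getElem hjN]; rfl
    have hti : (i + 1).toNat = i.toNat + 1 := by omega
    have htj : (j + 1).toNat = j.toNat + 1 := by omega
    rw [if_pos ⟨hi0, hj0⟩, hgi, hgj]
    by_cases hle : p[i.toNat] ≤ t[j.toNat]
    · rw [if_pos hle,
        ihn ((i - 1) + 1).toNat (by omega) (i - 1) (j - 1) rfl (ans + 1) (by omega) (by omega),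
        show ((i - 1) + 1).toNat = i.toNat by omega,
        show ((j - 1) + 1).toNat = j.toNat by omega,
        show n = i.toNat + 1 by omega, htj,
        rev_take_succ p i.toNat hiN, rev_take_succ t j.toNat hjN]
      simp only [Fd, hle, if_true]
      ring
    · rw [if_neg hle,
        ihn ((i - 1) + 1).toNat (by omega) (i - 1) j rfl ans (by omega) hj,
        show ((i - 1) + 1).toNat = i.toNat by omega,
        show n = i.toNat + 1 by omega, htj,
        rev_take_succ p i.toNat hiN, rev_take_succ t j.toNat hjN]
      simp only [Fd, hle, if_false]
  · rw [if_neg hij]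
    have : (p.take n).reverse = [] ∨ (t.take (j + 1).toNat).reverse = [] := by
      rcases not_and_or.mp hij with h | h
      · left; have : n = 0 := by omega
        simp [this]
      · right; have : (j + 1).toNat = 0 := by omega
        simp [this]
    rcases this with h | h
    · rw [h, Fd_nil_left]; omega
    · rw [h, Fd_nil_right]; omega

lemma Ga_nonneg (p : List Int) : ∀ t, 0 ≤ Ga p t := by
  induction p with
  | nil => intro t; rw [Ga_nil_left]
  | cons x ps ih =>
    intro t
    induction t with
    | nil => rw [Ga_nil_right]
    | cons y ts iht =>
      by_cases h : x ≤ y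
      · have := ih ts; simp [Ga, h]; omega
      · simpa [Ga, h] using iht

lemma Ga_le (p : List Int) : ∀ t, Ga p t ≤ (p.length : Int) ∧ Ga p t ≤ (t.length : Int) := by
  induction p with
  | nil => intro t; rw [Ga_nil_left]; constructor <;> simp
  | cons x ps ih =>
    intro t
    induction t with
    | nil => rw [Ga_nil_right]; constructor <;> (simp only [List.length_cons, List.length_nil]; omega)
    | cons y ts iht =>
      by_cases h : x ≤ y
      · have := ih ts; simp only [Ga, h, if_true]; simp only [List.length_cons]
        push_cast; omega
      · have := iht; simp only [Ga, h, if_false] at this ⊢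
        simp only [List.length_cons] at this ⊢
        push_cast at this ⊢; omega

lemma FeasN_Ga (t : List Int) : ∀ p, t.Pairwise (· ≤ ·) → FeasN p t (Ga p t).toNat := by
  induction t with
  | nil => intro p _; rw [Ga_nil_right]; intro i hi; omega
  | cons y ts iht =>
    intro p ht
    have hyts : ∀ z ∈ ts, y ≤ z := (List.pairwise_cons.mp ht).1
    have hts : ts.Pairwise (· ≤ ·) := (List.pairwise_cons.mp ht).2
    cases p with
    | nil => rw [Ga_nil_left]; intro i hi; omega
    | cons x ps =>
      by_cases h : x ≤ y
      · -- Ga = 1 + Ga ps ts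
        have hIH := iht ps hts
        have hnn := Ga_nonneg ps ts
        have hle := (Ga_le ps ts).2
        simp only [Ga, h, if_true]
        have hg : (1 + Ga ps ts).toNat = (Ga ps ts).toNat + 1 := by omega
        rw [hg]
        intro i hi
        set g : Nat := (Ga ps ts).toNat with hgdef
        have hgts : g ≤ ts.length := by omega
        have hlen : (y :: ts).length - (g + 1) = ts.length - g := by
          simp only [List.length_cons]; omega
        rw [hlen]
        match i, hi with
        | 0, _ =>
          simp only [List.getD_cons_zero, Nat.add_zero]
          rcases Nat.eq_zero_or_pos (ts.length - g) with h0 | h0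
          · rw [h0]; simpa using h
          · have hidx : ts.length - g - 1 < ts.length := by omega
            have hd : ts.length - g = (ts.length - g - 1) + 1 := by omega
            rw [hd, List.getD_cons_succ, List.getD_eq_getElem _ _ hidx]
            exact le_trans h (hyts _ (List.getElem_mem hidx))
        | Nat.succ i', hi' =>
          have hi'' : i' < g := by omega
          have := hIH i' hi''
          have hshift : ts.length - g + Nat.succ i' = (ts.length - g + i') + 1 := by omega
          rw [List.getD_cons_succ, hshift, List.getD_cons_succ]
          exact this
      · -- Ga (x::ps) (y::ts) = Ga (x::ps) ts
        have hIH := iht (x :: ps) hts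
        have hle := (Ga_le (x :: ps) ts).2
        have hnn := Ga_nonneg (x :: ps) ts
        simp only [Ga, h, if_false]
        intro i hi
        set g : Nat := (Ga (x :: ps) ts).toNat with hgdef
        have hgts : g ≤ ts.length := by omega
        have hlen : (y :: ts).length - g = (ts.length - g) + 1 := by
          simp only [List.length_cons]; omega
        rw [hlen]
        have hshift : ts.length - g + 1 + i = (ts.length - g + i) + 1 := by omega
        rw [hshift, List.getD_cons_succ]
        exact hIH i hi

lemma Ga_max (t : List Int) : ∀ p (k : Nat), k ≤ p.length → k ≤ t.length →
    FeasN p t k → (k : Int) ≤ Ga p t := by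
  induction t with
  | nil => intro p k _ hk _; rw [Ga_nil_right]; simp at hk; omega
  | cons y ts iht =>
    intro p k hkp hkt hfeas
    cases p with
    | nil => simp at hkp; simp [hkp, Ga_nil_left]
    | cons x ps =>
      by_cases h : x ≤ y
      · simp only [Ga, h, if_true]
        match k, hkp, hkt, hfeas with
        | 0, _, _, _ => have := Ga_nonneg ps ts; omega
        | Nat.succ k', hkp', hkt', hfeas' =>
          have hk'p : k' ≤ ps.length := by simpa using hkp'
          have hk't : k' ≤ ts.length := by simpa using hkt'
          have hfs : FeasN ps ts k' := by
            intro i hi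
            have := hfeas' (i + 1) (by omega)
            have hlen : (y :: ts).length - (k' + 1) = ts.length - k' := by
              simp only [List.length_cons]; omega
            rw [hlen] at this
            have hshift : ts.length - k' + (i + 1) = (ts.length - k' + i) + 1 := by omega
            rw [hshift, List.getD_cons_succ, List.getD_cons_succ] at this
            exact this
          have := iht ps k' hk'p hk't hfs
          push_cast; omega
      · simp only [Ga, h, if_false]
        have hkts : k ≤ ts.length := by
          by_contra hc
          have hk : k = ts.length + 1 := by simp [List.length_cons] at hkt; omega
          have := hfeas 0 (by omega)
          rw [hk] at this
          simp [List.length_cons] at this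
          omega
        have hfs : FeasN (x :: ps) ts k := by
          intro i hi
          have := hfeas i hi
          have hlen : (y :: ts).length - k = (ts.length - k) + 1 := by
            simp only [List.length_cons]; omega
          rw [hlen] at this
          have hshift : ts.length - k + 1 + i = (ts.length - k + i) + 1 := by omega
          rw [hshift, List.getD_cons_succ] at this
          exact this
        exact iht (x :: ps) k hkp hkts hfs

lemma FeasN_mono (p t : List Int) (j k : Nat) (hjk : j ≤ k) (hkt : k ≤ t.length)
    (ht : t.Pairwise (· ≤ ·)) (hf : FeasN p t k) : FeasN p t j := by
  intro i hi
  have h1 := hf i (by omega)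
  have hik : t.length - k + i < t.length := by omega
  have hij : t.length - j + i < t.length := by omega
  have hmono : t.getD (t.length - k + i) 0 ≤ t.getD (t.length - j + i) 0 := by
    rcases Nat.lt_or_ge (t.length - k + i) (t.length - j + i) with hlt | hge
    · rw [List.getD_eq_getElem _ _ hik, List.getD_eq_getElem _ _ hij]
      exact List.pairwise_iff_getElem.mp ht _ _ hik hij hlt
    · have heq : t.length - k + i = t.length - j + i := by omega
      rw [heq]
  exact le_trans h1 hmono

-- okB in terms of FeasN (for 0 ≤ k ≤ len t, where no index wraps).
lemma okB_iff (p t : List Int) (k : Nat) (hk : k ≤ t.length) :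
    okB p t (k : Int) = true ↔ FeasN p t k := by
  unfold okB FeasN
  rw [List.all_eq_true]
  constructor
  · intro h i hi
    have hmem : (i : Int) ∈ PySem.List.pyRange 0 (k : Int) 1 := by
      rw [PySem.List.mem_pyRange_one]; omega
    have := h _ hmem
    rw [decide_eq_true_iff] at this
    have e1 : PySem.List.pyGetD p (i : Int) 0 = p.getD i 0 := PySem.List.pyGetD_natCast p i 0
    have e2 : ((t.length : Int) - (k : Int) + (i : Int)) = ((t.length - k + i : Nat) : Int) := by
      push_cast; omega
    rw [e1, e2, PySem.List.pyGetD_natCast] at this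
    exact this
  · intro h i hmem
    rw [PySem.List.mem_pyRange_one] at hmem
    obtain ⟨h0, hik⟩ := hmem
    rw [decide_eq_true_iff]
    have hiN : i.toNat < k := by omega
    have e0 : i = ((i.toNat : Nat) : Int) := by omega
    have e2 : ((t.length : Int) - (k : Int) + i) = ((t.length - k + i.toNat : Nat) : Int) := by
      push_cast; omega
    rw [e2, PySem.List.pyGetD_natCast, e0, PySem.List.pyGetD_natCast]
    exact h i.toNat hiN

-- The binary search homes in on Ga.
lemma bsB_eq_Ga (p t : List Int) (ht : t.Pairwise (· ≤ ·)) : ∀ (lo hi : Int),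
    0 ≤ lo → lo ≤ Ga p t → Ga p t ≤ hi → hi ≤ (p.length : Int) → hi ≤ (t.length : Int) →
    bsB p t lo hi = Ga p t := by
  intro lo hi
  induction hfuel : (hi - lo).toNat using Nat.strong_induction_on generalizing lo hi with
  | _ n ihn =>
  intro hlo0 hloG hGhi hhp hht
  rw [bsB]
  by_cases hlh : lo < hi
  · rw [if_pos hlh]
    set mid := PySem.Int.floordiv (lo + hi + 1) 2 with hmid
    have h1 : lo + 1 ≤ mid :=
      (PySem.Int.le_floordiv_iff_mul_le (by omega)).mpr (by omega)
    have h2 : mid < hi + 1 :=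
      (PySem.Int.floordiv_lt_iff_lt_mul (by omega)).mpr (by omega)
    by_cases hok : okB p t mid
    · rw [if_pos hok]
      have hmN : mid = ((mid.toNat : Nat) : Int) := by omega
      have hfeas : FeasN p t mid.toNat := by
        rw [← okB_iff p t mid.toNat (by omega)]
        rw [← hmN]; exact hok
      have hmG : mid ≤ Ga p t := by
        have := Ga_max t p mid.toNat (by omega) (by omega) hfeas
        omega
      exact ihn (hi - mid).toNat (by omega) mid hi rfl (by omega) hmG hGhi hhp hht
    · rw [if_neg hok]
      have hGmid : Ga p t ≤ mid - 1 := by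
        by_contra hc
        have hmG : mid ≤ Ga p t := by omega
        have hG0 := Ga_nonneg p t
        have hfG : FeasN p t (Ga p t).toNat := FeasN_Ga t p ht
        have hfm : FeasN p t mid.toNat :=
          FeasN_mono p t mid.toNat (Ga p t).toNat (by omega) (by have := (Ga_le p t).2; omega) ht hfG
        have : okB p t mid = true := by
          have hmN : mid = ((mid.toNat : Nat) : Int) := by omega
          rw [hmN, okB_iff p t mid.toNat (by omega)]
          exact hfm
        exact hok this
      exact ihn (mid - 1 - lo).toNat (by omega) lo (mid - 1) rfl hlo0 hloG hGmid (by omega) (by omega)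
  · rw [if_neg hlh]; omega

-- ===== VERDICT (by name: the statement is the Claim_ definition above) =====
theorem matchPlayersAndTrainers_spec : Claim_equal_matchPlayersAndTrainers := by
  intro players trainers _
  unfold Spec_matchPlayersAndTrainers matchPlayersAndTrainers matchPlayersAndTrainers_alt
  set p := PySem.List.sorted players (fun x => x) false with hp
  set t := PySem.List.sorted trainers (fun x => x) false with ht
  have hps : p.Pairwise (· ≤ ·) := by
    simpa using PySem.List.sorted_pairwise (xs := players) (key := fun x => x)
  have hts : t.Pairwise (· ≤ ·) := by
    simpa using PySem.List.sorted_pairwise (xs := trainers) (key := fun x => x)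
  rw [aLoop_eq_Fd p t ((p.length : Int) - 1) ((t.length : Int) - 1) 0 (by omega) (by omega),
    show (((p.length : Int) - 1) + 1).toNat = p.length by omega,
    show (((t.length : Int) - 1) + 1).toNat = t.length by omega,
    List.take_length, List.take_length, Fd_rev_eq_Ga p t hps hts]
  have hG0 := Ga_nonneg p t
  have hGle := Ga_le p t
  rw [bsB_eq_Ga p t hts 0 (min (p.length : Int) (t.length : Int)) (by omega) (by omega)
    (by omega) (by omega) (by omega)]
  omega
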